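-- pv_equiv track=rewrite | github.com/hyunmin625/pepper_smartfarm_plan_v2 | state-estimator/state_estimator/features.py | _build_sensor_quality_map
-- ===== SOURCE A (Python) =====
-- from typing import Any
--
-- UNTRUSTED_SENSOR_FLAGS = {
--     "bad",
--     "blocked",
--     "stale",
--     "missing",
--     "flatline",
--     "communication_loss",
--     "calibration_due",
--     "calibration_error",
--     "readback_mismatch",
--     "unknown_state",
-- }
--
-- SUSPECT_SENSOR_FLAGS = {
--     "partial",
--     "degraded",
--     "jump",
--     "reboot_recovery",
--     "readback_warning",
-- }
--
-- def _normalize_quality_flag(raw_value: Any) -> str: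
--     text = str(raw_value or "").strip().lower()
--     if not text:
--         return "missing"
--     if text in UNTRUSTED_SENSOR_FLAGS:
--         return "bad"
--     if text in SUSPECT_SENSOR_FLAGS:
--         return "suspect"
--     return "good"
--
-- def _build_sensor_quality_map(sensor_quality_flags: dict[str, list[str]]) -> dict[str, Any]:
--     built = {
--         key: _collapse_quality_flags(flags)
--         for key, flags in sensor_quality_flags.items()
--         if flags
--     }
--     if "overall" not in built:
--         built["overall"] = "missing"
--     return built
--
-- def _collapse_quality_flags(flags: list[str]) -> str:
--     normalized = [_normalize_quality_flag(flag) for flag in flags]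
--     if "bad" in normalized:
--         return "bad"
--     if "suspect" in normalized:
--         return "partial"
--     if "missing" in normalized:
--         return "missing"
--     return "good"
-- ===== SOURCE B (Python) =====
-- UNTRUSTED_SENSOR_FLAGS = {
--     "bad", "blocked", "stale", "missing", "flatline", "communication_loss",
--     "calibration_due", "calibration_error", "readback_mismatch", "unknown_state",
-- }
--
-- SUSPECT_SENSOR_FLAGS = {
--     "partial", "degraded", "jump", "reboot_recovery", "readback_warning",
-- }
--
-- _RANK_LABEL = {1: "good", 2: "missing", 3: "partial", 4: "bad"}
--
--
-- def _flag_rank(raw_value):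
--     text = str(raw_value or "").strip().lower()
--     if not text:
--         return 2
--     if text in UNTRUSTED_SENSOR_FLAGS:
--         return 4
--     if text in SUSPECT_SENSOR_FLAGS:
--         return 3
--     return 1
--
--
-- def _build_sensor_quality_map(sensor_quality_flags):
--     built = {
--         key: _RANK_LABEL[max(_flag_rank(flag) for flag in flags)]
--         for key, flags in sensor_quality_flags.items()
--         if flags
--     }
--     if "overall" not in built:
--         built["overall"] = "missing"
--     return built
-- ===== Notes on version B (the rewrite author's own statement) =====
-- stated objective: alternative
-- what changed: Per-sensor collapse replaced: instead of materializing a normalized label list and running three ordered membership scans over it, B maps each flag to a numeric severity rank, reduces with max in one pass, and translates the maximal rank back to a label.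
import Mathlib
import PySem

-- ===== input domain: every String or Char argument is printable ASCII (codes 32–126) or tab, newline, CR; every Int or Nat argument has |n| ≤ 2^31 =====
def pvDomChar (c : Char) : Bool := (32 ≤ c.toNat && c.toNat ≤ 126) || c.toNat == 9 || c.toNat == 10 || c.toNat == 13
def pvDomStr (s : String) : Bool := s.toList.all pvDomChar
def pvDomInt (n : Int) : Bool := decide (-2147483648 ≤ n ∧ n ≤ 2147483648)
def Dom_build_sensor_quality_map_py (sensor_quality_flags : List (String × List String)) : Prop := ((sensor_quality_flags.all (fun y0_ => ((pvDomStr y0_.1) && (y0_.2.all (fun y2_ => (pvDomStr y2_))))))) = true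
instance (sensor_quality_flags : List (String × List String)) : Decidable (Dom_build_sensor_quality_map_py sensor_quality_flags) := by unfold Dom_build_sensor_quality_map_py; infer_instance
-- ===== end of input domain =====

-- B collapses each sensor's flags by a single max-severity-rank pass instead of
-- three ordered membership scans over a normalized list (objective: alternative).


-- ===== PORT A =====
-- Python sets UNTRUSTED_SENSOR_FLAGS / SUSPECT_SENSOR_FLAGS (membership only)
def pvUntrusted : List String :=
  ["bad", "blocked", "stale", "missing", "flatline", "communication_loss",
   "calibration_due", "calibration_error", "readback_mismatch", "unknown_state"]

def pvSuspect : List String :=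
  ["partial", "degraded", "jump", "reboot_recovery", "readback_warning"]

-- _normalize_quality_flag; on a str argument, `str(raw_value or "")` is raw_value
-- itself when nonempty and "" when empty, so strip∘lower of the argument is exact.
def pvNormalizeQualityFlag (raw_value : String) : String :=
  let text := PySem.Str.lower (PySem.Str.strip raw_value)
  if text = "" then "missing"
  else if pvUntrusted.contains text then "bad"
  else if pvSuspect.contains text then "suspect"
  else "good"

-- _collapse_quality_flags
def pvCollapseQualityFlags (flags : List String) : String :=
  let normalized := flags.map pvNormalizeQualityFlag
  if normalized.contains "bad" then "bad"
  else if normalized.contains "suspect" then "partial"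
  else if normalized.contains "missing" then "missing"
  else "good"

def build_sensor_quality_map_py (sensor_quality_flags : List (String × List String)) : List (String × String) :=
  let built : PySem.Dict String String :=
    sensor_quality_flags.foldl
      (fun d kv => if kv.2 ≠ [] then d.insert kv.1 (pvCollapseQualityFlags kv.2) else d)
      PySem.Dict.empty
  let built := if built.contains "overall" = false then built.insert "overall" "missing" else built
  built.items

-- ===== PORT B =====
-- _flag_rank
def pvFlagRank (raw_value : String) : Int :=
  let text := PySem.Str.lower (PySem.Str.strip raw_value)
  if text = "" then 2
  else if pvUntrusted.contains text then 4
  else if pvSuspect.contains text then 3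
  else 1

-- _RANK_LABEL lookup (total on ranks 1..4, the only values _flag_rank produces)
def pvRankLabel (r : Int) : String :=
  if r = 4 then "bad" else if r = 3 then "partial" else if r = 2 then "missing" else "good"

-- _RANK_LABEL[max(_flag_rank(flag) for flag in flags)]; only called on nonempty
-- flags (the comprehension filters out empty lists), where Python's max reduces
-- from the first element — the [] branch is unreachable.
def pvCollapseByRank (flags : List String) : String :=
  match flags with
  | [] => "good"
  | f :: rest => pvRankLabel (rest.foldl (fun m g => max m (pvFlagRank g)) (pvFlagRank f))

def build_sensor_quality_map_py_alt (sensor_quality_flags : List (String × List String)) : List (String × String) :=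
  let built : PySem.Dict String String :=
    sensor_quality_flags.foldl
      (fun d kv => if kv.2 ≠ [] then d.insert kv.1 (pvCollapseByRank kv.2) else d)
      PySem.Dict.empty
  let built := if built.contains "overall" = false then built.insert "overall" "missing" else built
  built.items

-- ===== PRECONDITION & SPEC =====
def Spec_build_sensor_quality_map_py (sensor_quality_flags : List (String × List String)) (out : List (String × String)) : Prop := out = build_sensor_quality_map_py_alt sensor_quality_flags
instance (sensor_quality_flags : List (String × List String)) (out : List (String × String)) : Decidable (Spec_build_sensor_quality_map_py sensor_quality_flags out) := by unfold Spec_build_sensor_quality_map_py; infer_instance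

-- ===== CLAIM (what is proved, stated in full; the proofs are below) =====
def Claim_equal_build_sensor_quality_map_py : Prop := ∀ (sensor_quality_flags : List (String × List String)), Dom_build_sensor_quality_map_py sensor_quality_flags → Spec_build_sensor_quality_map_py sensor_quality_flags (build_sensor_quality_map_py sensor_quality_flags)

-- ===== LEMMAS AND PROOFS =====

-- severity rank of an already-normalized label (proof-only helper)
def pvRankOfNorm (n : String) : Int :=
  if n = "bad" then 4 else if n = "suspect" then 3 else if n = "missing" then 2 else 1

theorem pvFlagRank_eq (f : String) :
    pvFlagRank f = pvRankOfNorm (pvNormalizeQualityFlag f) := by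
  by_cases h1 : PySem.Str.lower (PySem.Str.strip f) = "" <;>
    by_cases h2 : PySem.Str.lower (PySem.Str.strip f) ∈ pvUntrusted <;>
      by_cases h3 : PySem.Str.lower (PySem.Str.strip f) ∈ pvSuspect <;>
        simp [pvFlagRank, pvNormalizeQualityFlag, pvRankOfNorm, h1, h2, h3]

theorem pvNorm_cases (f : String) :
    pvNormalizeQualityFlag f = "bad" ∨ pvNormalizeQualityFlag f = "suspect" ∨
    pvNormalizeQualityFlag f = "missing" ∨ pvNormalizeQualityFlag f = "good" := by
  simp only [pvNormalizeQualityFlag]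
  split_ifs <;> simp

-- recursive max of ranks with base 1 (proof-only helper)
def pvMaxR : List String → Int
  | [] => 1
  | f :: rest => max (pvFlagRank f) (pvMaxR rest)

-- rank of a collapse result ("partial" sits where "suspect" does)
def pvRankOfNorm' (n : String) : Int :=
  if n = "bad" then 4 else if n = "partial" then 3 else if n = "missing" then 2 else 1

theorem pvMaxR_eq_rank_collapse (flags : List String) :
    pvMaxR flags = pvRankOfNorm' (pvCollapseQualityFlags flags) := by
  induction flags with
  | nil => simp [pvMaxR, pvCollapseQualityFlags, pvRankOfNorm']
  | cons f rest ih =>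
      rcases pvNorm_cases f with h | h | h | h <;>
        simp [pvMaxR, pvFlagRank_eq f, h, pvRankOfNorm, pvCollapseQualityFlags,
              pvRankOfNorm'] at ih ⊢ <;>
        split_ifs at ih ⊢ <;> simp_all

theorem pvFoldl_max_eq (rest : List String) (i : Int) (hi : 1 ≤ i) :
    rest.foldl (fun m g => max m (pvFlagRank g)) i = max i (pvMaxR rest) := by
  induction rest generalizing i with
  | nil => simpa [pvMaxR] using (max_eq_left hi).symm
  | cons g rs ih =>
      have h1 : (1 : Int) ≤ max i (pvFlagRank g) := le_trans hi (le_max_left _ _)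
      simp [pvMaxR, List.foldl_cons, ih _ h1, max_assoc]

theorem pvRankLabel_rank' (n : String)
    (h : n = "bad" ∨ n = "partial" ∨ n = "missing" ∨ n = "good") :
    pvRankLabel (pvRankOfNorm' n) = n := by
  rcases h with h | h | h | h <;> simp [h, pvRankOfNorm', pvRankLabel]

theorem pvCollapse_cases (flags : List String) :
    pvCollapseQualityFlags flags = "bad" ∨ pvCollapseQualityFlags flags = "partial" ∨
    pvCollapseQualityFlags flags = "missing" ∨ pvCollapseQualityFlags flags = "good" := by
  simp only [pvCollapseQualityFlags]
  split_ifs <;> simp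

theorem pvCollapse_eq (flags : List String) (h : flags ≠ []) :
    pvCollapseQualityFlags flags = pvCollapseByRank flags := by
  obtain ⟨f, rest, rfl⟩ := List.exists_cons_of_ne_nil h
  have h1 : (1 : Int) ≤ pvFlagRank f := by
    rcases pvNorm_cases f with hn | hn | hn | hn <;>
      simp [pvFlagRank_eq f, hn, pvRankOfNorm]
  rw [pvCollapseByRank, pvFoldl_max_eq rest _ h1]
  have : max (pvFlagRank f) (pvMaxR rest) = pvMaxR (f :: rest) := rfl
  rw [this, pvMaxR_eq_rank_collapse]
  exact (pvRankLabel_rank' _ (pvCollapse_cases _)).symm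

-- ===== VERDICT (by name: the statement is the Claim_ definition above) =====
theorem build_sensor_quality_map_py_spec : Claim_equal_build_sensor_quality_map_py := by
  intro sqf _
  unfold Spec_build_sensor_quality_map_py build_sensor_quality_map_py build_sensor_quality_map_py_alt
  have hstep : (fun (d : PySem.Dict String String) (kv : String × List String) =>
        if kv.2 ≠ [] then d.insert kv.1 (pvCollapseQualityFlags kv.2) else d)
      = (fun d kv => if kv.2 ≠ [] then d.insert kv.1 (pvCollapseByRank kv.2) else d) := by
    funext d kv
    by_cases hk : kv.2 = []
    · simp [hk]
    · simp [hk, pvCollapse_eq _ hk]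
  rw [hstep]
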